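-- pv_equiv track=rewrite | github.com/aarozhang/EPIJudge | epi_judge_python/is_string_in_matrix.py | is_pattern_contained_in_grid
-- ===== SOURCE A (Python) =====
-- import functools
-- from typing import List
--
-- def is_pattern_contained_in_grid(grid: List[List[int]],
--                                  pattern: List[int]) -> bool:
--     @functools.lru_cache(None)
--     def search_pattern(x, y, offset) -> bool:
--         if offset == len(pattern):
--             return True
--
--         if (not (0 <= x < len(grid) and 0 <= y < len(grid[x]))) or grid[x][y] != pattern[offset]:
--             return False
--
--         return any(
--                 search_pattern(next_x, next_y, offset + 1)
--                 for next_x, next_y in [(x - 1, y), (x + 1, y), (x, y - 1), (x, y + 1)]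
--         )
--
--     return any(
--         search_pattern(i, j, 0) for i in range(len(grid)) for j in range(len(grid[i]))
--     )
-- ===== SOURCE B (Python) =====
-- def is_pattern_contained_in_grid(grid, pattern):
--     # Layered BFS over pattern offsets: frontier = candidate cells for the
--     # current offset; advance it through the pattern, failing when it empties.
--     frontier = {(i, j) for i in range(len(grid)) for j in range(len(grid[i]))}
--     for v in pattern:
--         frontier = {(x, y) for (x, y) in frontier
--                     if 0 <= x < len(grid) and 0 <= y < len(grid[x])
--                     and grid[x][y] == v}
--         if not frontier:
--             return False
--         frontier = {(x + dx, y + dy) for (x, y) in frontier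
--                     for dx, dy in ((-1, 0), (1, 0), (0, -1), (0, 1))}
--     return bool(frontier)
-- ===== Notes on version B (the rewrite author's own statement) =====
-- stated objective: alternative
-- what changed: Replaced the memoized top-down DFS recursion over (cell, offset) with an iterative layered BFS that advances a set frontier of candidate cells through the pattern offsets, returning False as soon as the frontier empties.
import Mathlib
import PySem

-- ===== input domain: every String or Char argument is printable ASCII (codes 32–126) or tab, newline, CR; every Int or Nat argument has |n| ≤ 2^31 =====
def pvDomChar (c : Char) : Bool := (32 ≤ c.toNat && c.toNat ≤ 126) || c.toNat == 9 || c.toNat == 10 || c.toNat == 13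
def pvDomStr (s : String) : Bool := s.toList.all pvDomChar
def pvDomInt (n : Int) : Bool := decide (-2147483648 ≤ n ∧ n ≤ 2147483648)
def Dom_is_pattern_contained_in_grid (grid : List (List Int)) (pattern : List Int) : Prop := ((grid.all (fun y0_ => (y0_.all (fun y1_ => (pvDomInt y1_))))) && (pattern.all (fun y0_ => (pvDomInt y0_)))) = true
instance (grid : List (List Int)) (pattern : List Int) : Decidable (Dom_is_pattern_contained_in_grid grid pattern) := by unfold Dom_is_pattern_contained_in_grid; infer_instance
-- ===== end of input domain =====

-- B replaces A's memoized DFS recursion by an iterative layered set-frontier BFS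
-- over pattern offsets (alternative decomposition, same asymptotic cost).


-- ===== PORT A =====
-- search_pattern(x, y, offset); lru_cache only memoizes a pure function, so the
-- plain recursion has the same value. Python's 'offset == len(pattern)' test is
-- ported as 'len(pattern) <= offset': offset starts at 0 and increments, so it
-- never exceeds len(pattern) on reachable calls, and ≥ makes termination evident.
def pvA_search (grid : List (List Int)) (pattern : List Int) (x y : Int) (offset : Nat) : Bool :=
  if _h : pattern.length ≤ offset then true
  else if ¬(0 ≤ x ∧ x < (grid.length : Int) ∧ 0 ≤ y ∧ y < ((grid.getD x.toNat []).length : Int)) then false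
  else if (grid.getD x.toNat []).getD y.toNat 0 ≠ pattern.getD offset 0 then false
  else
    pvA_search grid pattern (x - 1) y (offset + 1) ||
    pvA_search grid pattern (x + 1) y (offset + 1) ||
    pvA_search grid pattern x (y - 1) (offset + 1) ||
    pvA_search grid pattern x (y + 1) (offset + 1)
termination_by pattern.length - offset
decreasing_by all_goals omega

def is_pattern_contained_in_grid (grid : List (List Int)) (pattern : List Int) : Bool :=
  (List.range grid.length).any (fun (i : Nat) =>
    (List.range (grid.getD i []).length).any (fun (j : Nat) =>
      pvA_search grid pattern (i : Int) (j : Int) 0))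

-- ===== PORT B =====
-- the 'for v in pattern' loop, one recursive step per pattern value
def pvB_loop (grid : List (List Int)) : List Int → List (Int × Int) → Bool
  | [], frontier => decide (frontier ≠ [])
  | v :: rest, frontier =>
    let matched : PySem.Set (Int × Int) := PySem.Set.ofList (frontier.filter (fun p =>
      decide ((0 ≤ p.1 ∧ p.1 < (grid.length : Int) ∧ 0 ≤ p.2 ∧ p.2 < ((grid.getD p.1.toNat []).length : Int))
              ∧ (grid.getD p.1.toNat []).getD p.2.toNat 0 = v)))
    if matched = [] then false
    else pvB_loop grid rest (PySem.Set.ofList (matched.flatMap (fun p =>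
      [(p.1 - 1, p.2), (p.1 + 1, p.2), (p.1, p.2 - 1), (p.1, p.2 + 1)])))

def is_pattern_contained_in_grid_alt (grid : List (List Int)) (pattern : List Int) : Bool :=
  pvB_loop grid pattern (PySem.Set.ofList ((List.range grid.length).flatMap (fun (i : Nat) =>
    (List.range (grid.getD i []).length).map (fun (j : Nat) => ((i : Int), (j : Int))))))

-- ===== PRECONDITION & SPEC =====
def Spec_is_pattern_contained_in_grid (grid : List (List Int)) (pattern : List Int) (out : Bool) : Prop := out = is_pattern_contained_in_grid_alt grid pattern
instance (grid : List (List Int)) (pattern : List Int) (out : Bool) : Decidable (Spec_is_pattern_contained_in_grid grid pattern out) := by unfold Spec_is_pattern_contained_in_grid; infer_instance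

-- ===== CLAIM (what is proved, stated in full; the proofs are below) =====
def Claim_equal_is_pattern_contained_in_grid : Prop := ∀ (grid : List (List Int)) (pattern : List Int), Dom_is_pattern_contained_in_grid grid pattern → Spec_is_pattern_contained_in_grid grid pattern (is_pattern_contained_in_grid grid pattern)

-- ===== LEMMAS AND PROOFS =====

-- reference semantics: "a matching chain for the pattern suffix starts at (x,y)"
def pvChain (grid : List (List Int)) : List Int → Int → Int → Bool
  | [], _, _ => true
  | v :: rest, x, y =>
    if (0 ≤ x ∧ x < (grid.length : Int) ∧ 0 ≤ y ∧ y < ((grid.getD x.toNat []).length : Int))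
       ∧ (grid.getD x.toNat []).getD y.toNat 0 = v
    then pvChain grid rest (x - 1) y || pvChain grid rest (x + 1) y ||
         pvChain grid rest x (y - 1) || pvChain grid rest x (y + 1)
    else false

theorem pvA_search_eq_chain (grid : List (List Int)) (pattern : List Int) :
    ∀ (offset : Nat) (x y : Int),
      pvA_search grid pattern x y offset = pvChain grid (pattern.drop offset) x y := by
  have aux : ∀ (n offset : Nat) (x y : Int), pattern.length - offset ≤ n →
      pvA_search grid pattern x y offset = pvChain grid (pattern.drop offset) x y := by
    intro n
    induction n with
    | zero =>
      intro offset x y h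
      have hle : pattern.length ≤ offset := by omega
      rw [pvA_search, List.drop_eq_nil_of_le hle]
      simp [hle, pvChain]
    | succ n ih =>
      intro offset x y h
      rw [pvA_search]
      by_cases hle : pattern.length ≤ offset
      · rw [List.drop_eq_nil_of_le hle]
        simp [hle, pvChain]
      · have hlt : offset < pattern.length := by omega
        rw [List.drop_eq_getElem_cons hlt]
        rw [dif_neg hle]
        simp only [pvChain]
        rw [List.getD_eq_getElem pattern 0 hlt]
        by_cases hc : (0 ≤ x ∧ x < (grid.length : Int) ∧ 0 ≤ y ∧ y < ((grid.getD x.toNat []).length : Int))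
        · by_cases hv : (grid.getD x.toNat []).getD y.toNat 0 = pattern[offset]
          · rw [if_neg (not_not_intro hc), if_neg (not_not_intro hv), if_pos ⟨hc, hv⟩]
            rw [ih (offset+1) (x-1) y (by omega), ih (offset+1) (x+1) y (by omega),
                ih (offset+1) x (y-1) (by omega), ih (offset+1) x (y+1) (by omega)]
          · rw [if_neg (not_not_intro hc), if_pos hv, if_neg (fun hch => hv hch.2)]
        · rw [if_pos hc, if_neg (fun hch => hc hch.1)]
  intro offset x y
  exact aux (pattern.length - offset) offset x y (le_refl _)

theorem pvB_loop_eq_any (grid : List (List Int)) :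
    ∀ (ps : List Int) (frontier : List (Int × Int)),
      pvB_loop grid ps frontier = frontier.any (fun p => pvChain grid ps p.1 p.2) := by
  intro ps
  induction ps with
  | nil =>
    intro fr
    cases fr <;> simp [pvB_loop, pvChain]
  | cons v rest ih =>
    intro fr
    simp only [pvB_loop]
    by_cases hm : PySem.Set.ofList (fr.filter (fun p =>
        decide ((0 ≤ p.1 ∧ p.1 < (grid.length : Int) ∧ 0 ≤ p.2 ∧ p.2 < ((grid.getD p.1.toNat []).length : Int))
                ∧ (grid.getD p.1.toNat []).getD p.2.toNat 0 = v))) = []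
    · rw [if_pos hm]
      symm
      rw [List.any_eq_false]
      intro p hp
      have hnp : ¬ ((0 ≤ p.1 ∧ p.1 < (grid.length : Int) ∧ 0 ≤ p.2 ∧ p.2 < ((grid.getD p.1.toNat []).length : Int))
                ∧ (grid.getD p.1.toNat []).getD p.2.toNat 0 = v) := by
        intro hcp
        have hmm : p ∈ PySem.Set.ofList (fr.filter (fun p =>
            decide ((0 ≤ p.1 ∧ p.1 < (grid.length : Int) ∧ 0 ≤ p.2 ∧ p.2 < ((grid.getD p.1.toNat []).length : Int))
                    ∧ (grid.getD p.1.toNat []).getD p.2.toNat 0 = v))) := by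
          rw [PySem.Set.mem_ofList, List.mem_filter]
          exact ⟨hp, by simpa using hcp⟩
        rw [hm] at hmm
        exact absurd hmm List.not_mem_nil
      show ¬ pvChain grid (v :: rest) p.1 p.2 = true
      simp only [pvChain]
      rw [if_neg hnp]
      simp
    · rw [if_neg hm, ih]
      rw [Bool.eq_iff_iff]
      simp only [List.any_eq_true]
      constructor
      · rintro ⟨r, hr, hSr⟩
        rw [PySem.Set.mem_ofList, List.mem_flatMap] at hr
        obtain ⟨q, hq, hrq⟩ := hr
        rw [PySem.Set.mem_ofList, List.mem_filter] at hq
        obtain ⟨hqfr, hqc⟩ := hq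
        refine ⟨q, hqfr, ?_⟩
        have hcq := of_decide_eq_true hqc
        simp only [pvChain, if_pos hcq]
        simp only [List.mem_cons, List.not_mem_nil, or_false] at hrq
        rcases hrq with h | h | h | h <;> subst h <;> simp at hSr <;> simp [hSr]
      · rintro ⟨p, hp, hSp⟩
        simp only [pvChain] at hSp
        by_cases hcp : ((0 ≤ p.1 ∧ p.1 < (grid.length : Int) ∧ 0 ≤ p.2 ∧ p.2 < ((grid.getD p.1.toNat []).length : Int))
                ∧ (grid.getD p.1.toNat []).getD p.2.toNat 0 = v)
        · rw [if_pos hcp] at hSp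
          have hpm : p ∈ PySem.Set.ofList (fr.filter (fun p =>
              decide ((0 ≤ p.1 ∧ p.1 < (grid.length : Int) ∧ 0 ≤ p.2 ∧ p.2 < ((grid.getD p.1.toNat []).length : Int))
                      ∧ (grid.getD p.1.toNat []).getD p.2.toNat 0 = v))) := by
            rw [PySem.Set.mem_ofList, List.mem_filter]
            exact ⟨hp, by simpa using hcp⟩
          simp only [Bool.or_eq_true] at hSp
          rcases hSp with ((h | h) | h) | h
          · exact ⟨(p.1 - 1, p.2), by rw [PySem.Set.mem_ofList, List.mem_flatMap]; exact ⟨p, hpm, by simp⟩, h⟩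
          · exact ⟨(p.1 + 1, p.2), by rw [PySem.Set.mem_ofList, List.mem_flatMap]; exact ⟨p, hpm, by simp⟩, h⟩
          · exact ⟨(p.1, p.2 - 1), by rw [PySem.Set.mem_ofList, List.mem_flatMap]; exact ⟨p, hpm, by simp⟩, h⟩
          · exact ⟨(p.1, p.2 + 1), by rw [PySem.Set.mem_ofList, List.mem_flatMap]; exact ⟨p, hpm, by simp⟩, h⟩
        · rw [if_neg hcp] at hSp
          exact absurd hSp (by simp)

-- ===== VERDICT (by name: the statement is the Claim_ definition above) =====
theorem is_pattern_contained_in_grid_spec : Claim_equal_is_pattern_contained_in_grid := by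
  intro grid pattern _hdom
  unfold Spec_is_pattern_contained_in_grid
  unfold is_pattern_contained_in_grid is_pattern_contained_in_grid_alt
  rw [pvB_loop_eq_any]
  rw [Bool.eq_iff_iff]
  simp only [List.any_eq_true]
  constructor
  · rintro ⟨i, hi, j, hj, hs⟩
    rw [List.mem_range] at hi hj
    refine ⟨((i : Int), (j : Int)), ?_, ?_⟩
    · rw [PySem.Set.mem_ofList]
      simp only [List.mem_flatMap, List.mem_map, List.mem_range]
      exact ⟨i, hi, j, hj, rfl⟩
    · rw [pvA_search_eq_chain] at hs
      simpa using hs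
  · rintro ⟨p, hp, hs⟩
    rw [PySem.Set.mem_ofList] at hp
    simp only [List.mem_flatMap, List.mem_map, List.mem_range] at hp
    obtain ⟨i, hi, j, hj, hpj⟩ := hp
    refine ⟨i, List.mem_range.mpr hi, j, List.mem_range.mpr hj, ?_⟩
    rw [pvA_search_eq_chain]
    rw [← hpj] at hs
    simpa using hs
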